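-- pv_equiv track=rewrite | github.com/rlunar/valkey-workshops | workshop/scripts/populate_aircraft.py | determine_airline_fleet_profile
-- ===== SOURCE A (Python) =====
-- from typing import Dict, List, Any
--
-- def determine_airline_fleet_profile(airline: Dict[str, Any]) -> Dict[str, int]:
--     """Determine realistic fleet composition based on airline characteristics"""
--     airline_name = airline['name'].lower()
--
--     # Major US/International airlines (800+ aircraft)
--     if any(keyword in airline_name for keyword in ['american airlines', 'delta air', 'united airlines', 'southwest']):
--         return {
--             'wide_body': 80,      # Long-haul fleet
--             'narrow_body': 650,   # Main domestic/short-haul fleet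
--             'regional': 120,      # Regional routes
--             'small': 10           # Charter/special ops
--         }
--
--     # Large international carriers (400-800 aircraft)
--     elif any(keyword in airline_name for keyword in ['lufthansa', 'air france', 'british airways', 'emirates', 'qatar', 'singapore', 'klm', 'turkish']):
--         return {
--             'wide_body': 120,     # Heavy international focus
--             'narrow_body': 280,   # European/domestic routes
--             'regional': 80,       # Regional connections
--             'small': 5            # VIP/charter
--         }
--
--     # Medium international airlines (200-400 aircraft)
--     elif any(keyword in airline_name for keyword in ['air canada', 'qantas', 'japan airlines', 'korean air', 'cathay', 'virgin atlantic', 'alitalia']):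
--         return {
--             'wide_body': 60,      # International routes
--             'narrow_body': 180,   # Domestic/regional international
--             'regional': 60,       # Regional feeders
--             'small': 5            # Special ops
--         }
--
--     # Low-cost carriers (100-300 aircraft)
--     elif any(keyword in airline_name for keyword in ['ryanair', 'easyjet', 'jetblue', 'spirit', 'frontier', 'allegiant', 'wizz']):
--         return {
--             'wide_body': 5,       # Limited long-haul
--             'narrow_body': 180,   # Main fleet
--             'regional': 25,       # Smaller markets
--             'small': 0            # No small aircraft
--         }
--
--     # Regional airlines (50-150 aircraft)
--     elif any(keyword in airline_name for keyword in ['regional', 'express', 'commuter', 'connection', 'link', 'eagle', 'skywest']):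
--         return {
--             'wide_body': 0,       # No wide-body
--             'narrow_body': 20,    # Limited mainline
--             'regional': 80,       # Main regional fleet
--             'small': 25           # Smaller routes
--         }
--
--     # Cargo airlines (50-200 aircraft)
--     elif any(keyword in airline_name for keyword in ['cargo', 'freight', 'fedex', 'ups', 'dhl']):
--         return {
--             'wide_body': 60,      # Long-haul cargo
--             'narrow_body': 40,    # Medium-haul cargo
--             'regional': 15,       # Regional cargo
--             'small': 5            # Small package delivery
--         }
--
--     # Charter/private airlines (10-50 aircraft)
--     elif any(keyword in airline_name for keyword in ['charter', 'private', 'executive', 'jet', 'aviation']):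
--         return {
--             'wide_body': 2,       # VIP long-haul
--             'narrow_body': 8,     # Charter flights
--             'regional': 15,       # Regional charter
--             'small': 25           # Private/executive
--         }
--
--     # Small/startup airlines (20-100 aircraft)
--     elif any(keyword in airline_name for keyword in ['air', 'fly', 'wings', 'sky']):
--         return {
--             'wide_body': 5,       # Limited international
--             'narrow_body': 45,    # Main fleet
--             'regional': 25,       # Regional routes
--             'small': 5            # Niche routes
--         }
--
--     # Default medium airline (50-150 aircraft)
--     return {
--         'wide_body': 10,      # Some international
--         'narrow_body': 60,    # Main domestic fleet
--         'regional': 30,       # Regional connections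
--         'small': 5            # Special routes
--     }
-- ===== SOURCE B (Python) =====
-- from typing import Dict, List, Any
--
-- # Profiles indexed by tier; index 8 is the default profile.
-- _PROFILES = [
--     {'wide_body': 80, 'narrow_body': 650, 'regional': 120, 'small': 10},
--     {'wide_body': 120, 'narrow_body': 280, 'regional': 80, 'small': 5},
--     {'wide_body': 60, 'narrow_body': 180, 'regional': 60, 'small': 5},
--     {'wide_body': 5, 'narrow_body': 180, 'regional': 25, 'small': 0},
--     {'wide_body': 0, 'narrow_body': 20, 'regional': 80, 'small': 25},
--     {'wide_body': 60, 'narrow_body': 40, 'regional': 15, 'small': 5},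
--     {'wide_body': 2, 'narrow_body': 8, 'regional': 15, 'small': 25},
--     {'wide_body': 5, 'narrow_body': 45, 'regional': 25, 'small': 5},
--     {'wide_body': 10, 'narrow_body': 60, 'regional': 30, 'small': 5},
-- ]
--
-- # Every keyword tagged with its tier number (tier order = A's precedence order).
-- _KEYWORD_TIERS = [
--     ('american airlines', 0), ('delta air', 0), ('united airlines', 0), ('southwest', 0),
--     ('lufthansa', 1), ('air france', 1), ('british airways', 1), ('emirates', 1),
--     ('qatar', 1), ('singapore', 1), ('klm', 1), ('turkish', 1),
--     ('air canada', 2), ('qantas', 2), ('japan airlines', 2), ('korean air', 2),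
--     ('cathay', 2), ('virgin atlantic', 2), ('alitalia', 2),
--     ('ryanair', 3), ('easyjet', 3), ('jetblue', 3), ('spirit', 3),
--     ('frontier', 3), ('allegiant', 3), ('wizz', 3),
--     ('regional', 4), ('express', 4), ('commuter', 4), ('connection', 4),
--     ('link', 4), ('eagle', 4), ('skywest', 4),
--     ('cargo', 5), ('freight', 5), ('fedex', 5), ('ups', 5), ('dhl', 5),
--     ('charter', 6), ('private', 6), ('executive', 6), ('jet', 6), ('aviation', 6),
--     ('air', 7), ('fly', 7), ('wings', 7), ('sky', 7),
-- ]
--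
--
-- def determine_airline_fleet_profile(airline: Dict[str, Any]) -> Dict[str, int]:
--     """Determine realistic fleet composition based on airline characteristics.
--
--     Scans every keyword once and keeps the smallest (highest-precedence) tier
--     that matches; since keyword tiers follow A's branch order, the minimum
--     matching tier is exactly the branch A would take.
--     """
--     name = airline['name'].lower()
--     tier = 8  # default profile
--     for keyword, t in _KEYWORD_TIERS:
--         if keyword in name:
--             tier = min(tier, t)
--     return dict(_PROFILES[tier])
-- ===== Notes on version B (the rewrite author's own statement) =====
-- stated objective: alternative
-- what changed: Instead of an ordered if/elif cascade with short-circuiting any() tests, B scans a single flat (keyword, tier) list once keeping the minimum matching tier, then indexes a profile table by that tier; the minimum matching tier equals A's first-matching branch because tiers follow branch order.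
import Mathlib
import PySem

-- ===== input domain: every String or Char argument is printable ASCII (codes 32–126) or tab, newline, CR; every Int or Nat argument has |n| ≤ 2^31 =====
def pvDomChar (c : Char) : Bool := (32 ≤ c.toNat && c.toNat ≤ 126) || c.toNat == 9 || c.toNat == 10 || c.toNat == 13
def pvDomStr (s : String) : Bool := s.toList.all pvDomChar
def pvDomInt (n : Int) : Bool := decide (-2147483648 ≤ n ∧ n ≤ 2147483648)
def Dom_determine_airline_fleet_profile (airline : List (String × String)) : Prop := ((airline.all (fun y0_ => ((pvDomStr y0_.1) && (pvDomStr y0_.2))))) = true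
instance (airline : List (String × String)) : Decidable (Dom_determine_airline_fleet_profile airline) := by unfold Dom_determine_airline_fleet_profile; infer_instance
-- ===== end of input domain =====

-- B replaces the ordered if/elif cascade by one flat (keyword, tier) scan keeping the
-- minimum matching tier, then indexes a profile table (alternative, same cost);
-- equivalence is about the return value only.

-- ===== PORT A =====
-- literal transliteration of the if/elif cascade; airline['name'] = first-match lookup
def determine_airline_fleet_profile (airline : List (String × String)) : List (String × Int) :=
  match (PySem.Dict.mk airline).get? "name" with
  | none => []   -- KeyError in Python; excluded by Pre_
  | some v =>
    let airline_name := PySem.Str.lower v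
    if ["american airlines", "delta air", "united airlines", "southwest"].any
         (fun keyword => PySem.Str.isIn keyword airline_name) then
      [("wide_body", 80), ("narrow_body", 650), ("regional", 120), ("small", 10)]
    else if ["lufthansa", "air france", "british airways", "emirates", "qatar", "singapore", "klm", "turkish"].any
         (fun keyword => PySem.Str.isIn keyword airline_name) then
      [("wide_body", 120), ("narrow_body", 280), ("regional", 80), ("small", 5)]
    else if ["air canada", "qantas", "japan airlines", "korean air", "cathay", "virgin atlantic", "alitalia"].any
         (fun keyword => PySem.Str.isIn keyword airline_name) then
      [("wide_body", 60), ("narrow_body", 180), ("regional", 60), ("small", 5)]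
    else if ["ryanair", "easyjet", "jetblue", "spirit", "frontier", "allegiant", "wizz"].any
         (fun keyword => PySem.Str.isIn keyword airline_name) then
      [("wide_body", 5), ("narrow_body", 180), ("regional", 25), ("small", 0)]
    else if ["regional", "express", "commuter", "connection", "link", "eagle", "skywest"].any
         (fun keyword => PySem.Str.isIn keyword airline_name) then
      [("wide_body", 0), ("narrow_body", 20), ("regional", 80), ("small", 25)]
    else if ["cargo", "freight", "fedex", "ups", "dhl"].any
         (fun keyword => PySem.Str.isIn keyword airline_name) then
      [("wide_body", 60), ("narrow_body", 40), ("regional", 15), ("small", 5)]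
    else if ["charter", "private", "executive", "jet", "aviation"].any
         (fun keyword => PySem.Str.isIn keyword airline_name) then
      [("wide_body", 2), ("narrow_body", 8), ("regional", 15), ("small", 25)]
    else if ["air", "fly", "wings", "sky"].any
         (fun keyword => PySem.Str.isIn keyword airline_name) then
      [("wide_body", 5), ("narrow_body", 45), ("regional", 25), ("small", 5)]
    else
      [("wide_body", 10), ("narrow_body", 60), ("regional", 30), ("small", 5)]

-- ===== PORT B =====
-- profiles indexed by tier; index 8 is the default profile
def fleetProfiles : List (List (String × Int)) :=
  [ [("wide_body", 80), ("narrow_body", 650), ("regional", 120), ("small", 10)],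
    [("wide_body", 120), ("narrow_body", 280), ("regional", 80), ("small", 5)],
    [("wide_body", 60), ("narrow_body", 180), ("regional", 60), ("small", 5)],
    [("wide_body", 5), ("narrow_body", 180), ("regional", 25), ("small", 0)],
    [("wide_body", 0), ("narrow_body", 20), ("regional", 80), ("small", 25)],
    [("wide_body", 60), ("narrow_body", 40), ("regional", 15), ("small", 5)],
    [("wide_body", 2), ("narrow_body", 8), ("regional", 15), ("small", 25)],
    [("wide_body", 5), ("narrow_body", 45), ("regional", 25), ("small", 5)],
    [("wide_body", 10), ("narrow_body", 60), ("regional", 30), ("small", 5)] ]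

-- every keyword tagged with its tier number (tier order = A's precedence order)
def keywordTiers : List (String × Nat) :=
  [ ("american airlines", 0), ("delta air", 0), ("united airlines", 0), ("southwest", 0),
    ("lufthansa", 1), ("air france", 1), ("british airways", 1), ("emirates", 1),
    ("qatar", 1), ("singapore", 1), ("klm", 1), ("turkish", 1),
    ("air canada", 2), ("qantas", 2), ("japan airlines", 2), ("korean air", 2),
    ("cathay", 2), ("virgin atlantic", 2), ("alitalia", 2),
    ("ryanair", 3), ("easyjet", 3), ("jetblue", 3), ("spirit", 3),
    ("frontier", 3), ("allegiant", 3), ("wizz", 3),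
    ("regional", 4), ("express", 4), ("commuter", 4), ("connection", 4),
    ("link", 4), ("eagle", 4), ("skywest", 4),
    ("cargo", 5), ("freight", 5), ("fedex", 5), ("ups", 5), ("dhl", 5),
    ("charter", 6), ("private", 6), ("executive", 6), ("jet", 6), ("aviation", 6),
    ("air", 7), ("fly", 7), ("wings", 7), ("sky", 7) ]

def determine_airline_fleet_profile_alt (airline : List (String × String)) : List (String × Int) :=
  match (PySem.Dict.mk airline).get? "name" with
  | none => []   -- KeyError in Python; excluded by Pre_
  | some v =>
    let name := PySem.Str.lower v
    let tier := keywordTiers.foldl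
      (fun tier p => if PySem.Str.isIn p.1 name then min tier p.2 else tier) 8
    fleetProfiles.getD tier []

-- ===== PRECONDITION & SPEC =====
-- Pre_ excludes exactly the inputs with no "name" key, where Python A raises KeyError.
def Pre_determine_airline_fleet_profile (airline : List (String × String)) : Prop :=
  ∃ p ∈ airline, p.1 = "name"
instance (airline : List (String × String)) : Decidable (Pre_determine_airline_fleet_profile airline) := by unfold Pre_determine_airline_fleet_profile; infer_instance
def pvWitness_determine_airline_fleet_profile : (List (String × String)) := [("name", "Delta Air Lines")]

def Spec_determine_airline_fleet_profile (airline : List (String × String)) (out : List (String × Int)) : Prop := out = determine_airline_fleet_profile_alt airline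
instance (airline : List (String × String)) (out : List (String × Int)) : Decidable (Spec_determine_airline_fleet_profile airline out) := by unfold Spec_determine_airline_fleet_profile; infer_instance

-- ===== CLAIM (what is proved, stated in full; the proofs are below) =====
def Claim_equal_determine_airline_fleet_profile : Prop := ∀ (airline : List (String × String)), Dom_determine_airline_fleet_profile airline → Pre_determine_airline_fleet_profile airline → Spec_determine_airline_fleet_profile airline (determine_airline_fleet_profile airline)

-- ===== LEMMAS AND PROOFS =====

-- folding the min-tier update over a group of keywords that all carry the same tier t
-- collapses to: "if any keyword of the group matches, min acc t, else acc".
theorem fleet_group_fold (name : String) (ks : List String) (t acc : Nat) :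
    (ks.map (fun k => (k, t))).foldl
        (fun tier p => if PySem.Str.isIn p.1 name then min tier p.2 else tier) acc
      = if ks.any (fun k => PySem.Str.isIn k name) then min acc t else acc := by
  induction ks generalizing acc with
  | nil => rfl
  | cons k ks ih =>
    simp only [List.map_cons, List.foldl_cons, List.any_cons]
    by_cases h : PySem.Str.isIn k name = true
    · simp only [h, Bool.true_or, reduceIte, ih]
      by_cases ha : (ks.any fun k => PySem.Str.isIn k name) = true
      · simp only [ha, reduceIte]
        omega
      · rw [Bool.not_eq_true] at ha
        simp
    · rw [Bool.not_eq_true] at h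
      simp only [h, Bool.false_or, ih]
      simp

-- ===== VERDICT (by name: the statement is the Claim_ definition above) =====
theorem determine_airline_fleet_profile_spec : Claim_equal_determine_airline_fleet_profile := by
  intro airline _ _
  unfold Spec_determine_airline_fleet_profile determine_airline_fleet_profile determine_airline_fleet_profile_alt
  cases hget : (PySem.Dict.mk airline).get? "name" with
  | none => rfl
  | some v =>
    dsimp only
    set name := PySem.Str.lower v with hname
    have hk : keywordTiers
        = (["american airlines", "delta air", "united airlines", "southwest"].map (fun k => (k, 0)))
          ++ (["lufthansa", "air france", "british airways", "emirates", "qatar", "singapore", "klm", "turkish"].map (fun k => (k, 1)))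
          ++ (["air canada", "qantas", "japan airlines", "korean air", "cathay", "virgin atlantic", "alitalia"].map (fun k => (k, 2)))
          ++ (["ryanair", "easyjet", "jetblue", "spirit", "frontier", "allegiant", "wizz"].map (fun k => (k, 3)))
          ++ (["regional", "express", "commuter", "connection", "link", "eagle", "skywest"].map (fun k => (k, 4)))
          ++ (["cargo", "freight", "fedex", "ups", "dhl"].map (fun k => (k, 5)))
          ++ (["charter", "private", "executive", "jet", "aviation"].map (fun k => (k, 6)))
          ++ (["air", "fly", "wings", "sky"].map (fun k => (k, 7))) := by rfl
    rw [hk]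
    simp only [List.foldl_append, fleet_group_fold]
    cases h1 : (["american airlines", "delta air", "united airlines", "southwest"].any (fun k => PySem.Str.isIn k name)) with
    | true => simp; rfl
    | false =>
      cases h2 : (["lufthansa", "air france", "british airways", "emirates", "qatar", "singapore", "klm", "turkish"].any (fun k => PySem.Str.isIn k name)) with
      | true => simp; rfl
      | false =>
        cases h3 : (["air canada", "qantas", "japan airlines", "korean air", "cathay", "virgin atlantic", "alitalia"].any (fun k => PySem.Str.isIn k name)) with
        | true => simp; rfl
        | false =>
          cases h4 : (["ryanair", "easyjet", "jetblue", "spirit", "frontier", "allegiant", "wizz"].any (fun k => PySem.Str.isIn k name)) with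
          | true => simp; rfl
          | false =>
            cases h5 : (["regional", "express", "commuter", "connection", "link", "eagle", "skywest"].any (fun k => PySem.Str.isIn k name)) with
            | true => simp; rfl
            | false =>
              cases h6 : (["cargo", "freight", "fedex", "ups", "dhl"].any (fun k => PySem.Str.isIn k name)) with
              | true => simp; rfl
              | false =>
                cases h7 : (["charter", "private", "executive", "jet", "aviation"].any (fun k => PySem.Str.isIn k name)) with
                | true => simp; rfl
                | false =>
                  cases h8 : (["air", "fly", "wings", "sky"].any (fun k => PySem.Str.isIn k name)) with
                  | true => simp; rfl
                  | false => simp; rfl
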